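-- pv_equiv track=rewrite | github.com/jtonini/nomad | nomad/collectors/mount_probe.py | _decode_escapes
-- ===== SOURCE A (Python) =====
-- def _decode_escapes(s):
--     """Decode /proc/mounts octal escapes."""
--     if "\\" not in s:
--         return s
--     out = []
--     i = 0
--     while i < len(s):
--         if s[i] == "\\" and i + 3 < len(s) and s[i+1:i+4].isdigit():
--             try:
--                 out.append(chr(int(s[i+1:i+4], 8)))
--                 i += 4
--                 continue
--             except ValueError:
--                 pass
--         out.append(s[i])
--         i += 1
--     return "".join(out)
-- ===== SOURCE B (Python) =====
-- def _decode_escapes(s):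
--     """Decode /proc/mounts octal escapes."""
--     parts = s.split("\\")
--     res = [parts[0]]
--     for p in parts[1:]:
--         if len(p) >= 3 and all(c in "01234567" for c in p[:3]):
--             res.append(chr(int(p[:3], 8)) + p[3:])
--         else:
--             res.append("\\" + p)
--     return "".join(res)
-- ===== Notes on version B (the rewrite author's own statement) =====
-- stated objective: idiomatic
-- what changed: Replaces the manual index-based while-loop scan (with slicing and a try/except around int(...,8)) by splitting the string on backslashes once and decoding each piece's leading three-octal-digit prefix, joining the results.
import Mathlib
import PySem

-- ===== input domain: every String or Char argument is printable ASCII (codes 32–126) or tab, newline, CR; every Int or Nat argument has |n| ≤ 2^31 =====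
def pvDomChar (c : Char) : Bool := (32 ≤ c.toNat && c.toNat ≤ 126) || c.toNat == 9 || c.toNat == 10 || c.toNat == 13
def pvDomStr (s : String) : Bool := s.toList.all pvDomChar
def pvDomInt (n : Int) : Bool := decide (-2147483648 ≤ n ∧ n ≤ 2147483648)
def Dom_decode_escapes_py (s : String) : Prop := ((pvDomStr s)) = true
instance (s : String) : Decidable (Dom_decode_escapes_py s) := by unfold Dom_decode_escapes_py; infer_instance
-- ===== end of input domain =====

-- B decodes the same /proc/mounts octal escapes by split-on-backslash + per-piece decoding instead of A's index scan; return values proved equal on the stated input domain.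

-- ===== PORT A =====
-- int(p, 8) for a 3-digit string: value of the three octal digits
def pvOctVal (a b d : Char) : Nat :=
  (a.toNat - 48) * 64 + (b.toNat - 48) * 8 + (d.toNat - 48)

-- A's while loop: at '\', if three following chars exist and are digits, try int(...,8)
-- (which succeeds exactly when each digit is ≤ '7'; ValueError otherwise falls through
-- to the literal branch), else copy one char.
def pvLoopA : List Char → List Char
  | [] => []
  | c :: a :: b :: d :: rest =>
    if c = '\\' && PySem.Chars.isdigit a && PySem.Chars.isdigit b && PySem.Chars.isdigit d then
      if a ≤ '7' && b ≤ '7' && d ≤ '7' then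
        Char.ofNat (pvOctVal a b d) :: pvLoopA rest
      else c :: pvLoopA (a :: b :: d :: rest)
    else c :: pvLoopA (a :: b :: d :: rest)
  | c :: rest => c :: pvLoopA rest

def decode_escapes_py (s : String) : String :=
  if PySem.Str.isIn "\\" s = false then s
  else String.ofList (pvLoopA s.toList)

-- ===== PORT B =====
-- per-piece decoding: a piece with ≥ 3 chars whose first three are octal digits
-- becomes chr(int(p[:3],8)) + p[3:], otherwise the backslash stays literal
def pvDecPiece (p : List Char) : List Char :=
  match p with
  | a :: b :: d :: rest =>
    if ('0' ≤ a && a ≤ '7') && ('0' ≤ b && b ≤ '7') && ('0' ≤ d && d ≤ '7') then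
      Char.ofNat (pvOctVal a b d) :: rest
    else '\\' :: a :: b :: d :: rest
  | _ => '\\' :: p

-- s.split("\\") is PySem.Chars.splitOn on the char list (sep "\\" is nonempty);
-- splitOn never returns [], so the [] arm is unreachable
def decode_escapes_py_alt (s : String) : String :=
  match PySem.Chars.splitOn s.toList ['\\'] with
  | p0 :: rest => String.ofList (PySem.Chars.join [] (p0 :: rest.map pvDecPiece))
  | [] => ""

-- ===== PRECONDITION & SPEC =====
def Spec_decode_escapes_py (s : String) (out : String) : Prop := out = decode_escapes_py_alt s
instance (s : String) (out : String) : Decidable (Spec_decode_escapes_py s out) := by unfold Spec_decode_escapes_py; infer_instance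

-- ===== CLAIM (what is proved, stated in full; the proofs are below) =====
def Claim_equal_decode_escapes_py : Prop := ∀ (s : String), Dom_decode_escapes_py s → Spec_decode_escapes_py s (decode_escapes_py s)

-- ===== LEMMAS AND PROOFS =====

-- recursive characterization of splitting on a single backslash
def pvSplitBS : List Char → List (List Char)
  | [] => [[]]
  | c :: rest =>
    if c = '\\' then [] :: pvSplitBS rest
    else match pvSplitBS rest with
      | p :: ps => (c :: p) :: ps
      | [] => [[c]]

theorem pvSplitBS_ne_nil (l : List Char) : pvSplitBS l ≠ [] := by
  cases l with
  | nil => simp [pvSplitBS]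
  | cons c rest =>
    simp only [pvSplitBS]
    split <;> [simp; (split <;> simp)]

theorem pv_go_eq : ∀ (fuel : Nat) (l cur : List Char) (acc : List (List Char)),
    l.length < fuel →
    PySem.Chars.splitOn.go ['\\'] fuel l cur acc =
      acc.reverse ++ (match pvSplitBS l with
        | p :: ps => (cur.reverse ++ p) :: ps
        | [] => []) := by
  intro fuel
  induction fuel with
  | zero => intro l cur acc h; omega
  | succ n ih =>
    intro l cur acc h
    cases l with
    | nil => simp [PySem.Chars.splitOn.go, pvSplitBS]
    | cons c rest =>
      by_cases hc : c = '\\'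
      · subst hc
        rw [show PySem.Chars.splitOn.go ['\\'] (n+1) ('\\' :: rest) cur acc
              = PySem.Chars.splitOn.go ['\\'] n rest [] (cur.reverse :: acc) from by
            simp [PySem.Chars.splitOn.go, List.isPrefixOf]]
        rw [ih rest [] (cur.reverse :: acc) (by simpa using Nat.lt_of_succ_lt_succ h)]
        obtain ⟨p, ps, hps⟩ : ∃ p ps, pvSplitBS rest = p :: ps := by
          cases hx : pvSplitBS rest with
          | nil => exact absurd hx (pvSplitBS_ne_nil rest)
          | cons p ps => exact ⟨p, ps, rfl⟩
        simp [pvSplitBS, hps]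
      · rw [show PySem.Chars.splitOn.go ['\\'] (n+1) (c :: rest) cur acc
              = PySem.Chars.splitOn.go ['\\'] n rest (c :: cur) acc from by
            simp [PySem.Chars.splitOn.go, List.isPrefixOf, Ne.symm hc]]
        rw [ih rest (c :: cur) acc (by simpa using Nat.lt_of_succ_lt_succ h)]
        obtain ⟨p, ps, hps⟩ : ∃ p ps, pvSplitBS rest = p :: ps := by
          cases hx : pvSplitBS rest with
          | nil => exact absurd hx (pvSplitBS_ne_nil rest)
          | cons p ps => exact ⟨p, ps, rfl⟩
        simp [pvSplitBS, hc, hps]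

theorem pvSplitOn_eq (l : List Char) : PySem.Chars.splitOn l ['\\'] = pvSplitBS l := by
  rw [PySem.Chars.splitOn, pv_go_eq (l.length + 1) l [] [] (Nat.lt_succ_self _)]
  obtain ⟨p, ps, hps⟩ : ∃ p ps, pvSplitBS l = p :: ps := by
    cases hx : pvSplitBS l with
    | nil => exact absurd hx (pvSplitBS_ne_nil l)
    | cons p ps => exact ⟨p, ps, rfl⟩
  simp [hps]

theorem pv_join_nil_eq_flatten (parts : List (List Char)) :
    PySem.Chars.join [] parts = parts.flatten := by
  induction parts with
  | nil => simp [PySem.Chars.join_nil]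
  | cons p ps ih =>
    cases ps with
    | nil => simp [PySem.Chars.join_singleton]
    | cons q qs => rw [PySem.Chars.join_cons_cons]; simp_all

-- B's result on a char list, through the characterized split
def pvB (l : List Char) : List Char :=
  match pvSplitBS l with
  | p :: ps => p ++ (ps.map pvDecPiece).flatten
  | [] => []

theorem pvB_cons_ne (c : Char) (l : List Char) (hc : c ≠ '\\') :
    pvB (c :: l) = c :: pvB l := by
  obtain ⟨p, ps, hps⟩ : ∃ p ps, pvSplitBS l = p :: ps := by
    cases hx : pvSplitBS l with
    | nil => exact absurd hx (pvSplitBS_ne_nil l)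
    | cons p ps => exact ⟨p, ps, rfl⟩
  simp [pvB, pvSplitBS, hc, hps]

theorem pvB_cons_bs (l p : List Char) (ps : List (List Char)) (hps : pvSplitBS l = p :: ps) :
    pvB ('\\' :: l) = pvDecPiece p ++ (ps.map pvDecPiece).flatten := by
  simp [pvB, pvSplitBS, hps]

theorem pvSplitBS_exists (l : List Char) : ∃ p ps, pvSplitBS l = p :: ps := by
  cases hx : pvSplitBS l with
  | nil => exact absurd hx (pvSplitBS_ne_nil l)
  | cons p ps => exact ⟨p, ps, rfl⟩

-- peeling one non-backslash char off the head piece of the split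
theorem pvSplitBS_cons_elim (t : List Char) (x : Char) (p' : List Char) (ps : List (List Char))
    (h : pvSplitBS t = (x :: p') :: ps) :
    ∃ t', t = x :: t' ∧ x ≠ '\\' ∧ pvSplitBS t' = p' :: ps := by
  cases t with
  | nil => simp [pvSplitBS] at h
  | cons c t' =>
    by_cases hc : c = '\\'
    · simp [pvSplitBS, hc] at h
    · obtain ⟨q, qs, hq⟩ := pvSplitBS_exists t'
      simp [pvSplitBS, hc, hq] at h
      obtain ⟨⟨e1, e2⟩, e3⟩ := h
      subst e1
      exact ⟨t', rfl, hc, by rw [hq, e2, e3]⟩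

-- a backslash stays literal whenever the text after it does not start with three octal digits
theorem pvB_bs_fail (t : List Char)
    (hf : ∀ x y z r, t = x :: y :: z :: r →
      ¬((('0' ≤ x && x ≤ '7') && ('0' ≤ y && y ≤ '7') && ('0' ≤ z && z ≤ '7')) = true)) :
    pvB ('\\' :: t) = '\\' :: pvB t := by
  obtain ⟨p, ps, hps⟩ := pvSplitBS_exists t
  have hd : pvDecPiece p = '\\' :: p := by
    match p, hps with
    | [], _ => rfl
    | [_], _ => rfl
    | [_, _], _ => rfl
    | x :: y :: z :: r, hps =>
      obtain ⟨t1, ht1, _, h1⟩ := pvSplitBS_cons_elim t x (y :: z :: r) ps hps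
      obtain ⟨t2, ht2, _, h2⟩ := pvSplitBS_cons_elim t1 y (z :: r) ps h1
      obtain ⟨t3, ht3, _, _⟩ := pvSplitBS_cons_elim t2 z r ps h2
      have := hf x y z t3 (by rw [ht1, ht2, ht3])
      simp only [pvDecPiece]
      rw [if_neg this]
  simp [pvB, pvSplitBS, hps, hd]

theorem pv_digit_ne_bs (a : Char) (h : PySem.Chars.isdigit a = true) : a ≠ '\\' := by
  intro hx; subst hx; exact absurd h (by decide)

theorem pv_main (l : List Char) : pvLoopA l = pvB l := by
  induction l using pvLoopA.induct with
  | case1 => rfl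
  | case2 c a b d rest h1 h2 ih =>
    simp only [Bool.and_eq_true, decide_eq_true_eq] at h1 h2
    obtain ⟨⟨⟨hc, hda⟩, hdb⟩, hdd⟩ := h1
    obtain ⟨⟨h7a, h7b⟩, h7d⟩ := h2
    simp only [PySem.Chars.isdigit, Bool.and_eq_true, decide_eq_true_eq] at hda hdb hdd
    obtain ⟨p, ps, hps⟩ := pvSplitBS_exists rest
    have hsplit : pvSplitBS (a :: b :: d :: rest) = (a :: b :: d :: p) :: ps := by
      simp [pvSplitBS, pv_digit_ne_bs a (by simp [PySem.Chars.isdigit, hda.1, hda.2]),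
        pv_digit_ne_bs b (by simp [PySem.Chars.isdigit, hdb.1, hdb.2]),
        pv_digit_ne_bs d (by simp [PySem.Chars.isdigit, hdd.1, hdd.2]), hps]
    subst hc
    rw [show pvLoopA ('\\' :: a :: b :: d :: rest)
          = Char.ofNat (pvOctVal a b d) :: pvLoopA rest from by
        simp [pvLoopA, PySem.Chars.isdigit, hda.1, hda.2, hdb.1, hdb.2, hdd.1, hdd.2,
          h7a, h7b, h7d]]
    rw [ih, pvB_cons_bs _ _ _ hsplit]
    simp [pvB, hps, pvDecPiece, hda.1, h7a, hdb.1, h7b, hdd.1, h7d]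
  | case3 c a b d rest h1 h2 ih =>
    have h1' := h1
    simp only [Bool.and_eq_true, decide_eq_true_eq] at h1'
    obtain ⟨⟨⟨hc, hda⟩, hdb⟩, hdd⟩ := h1'
    subst hc
    have hA : pvLoopA ('\\' :: a :: b :: d :: rest) = '\\' :: pvLoopA (a :: b :: d :: rest) := by
      simp only [pvLoopA]
      rw [if_pos (by simpa using h1), if_neg h2]
    rw [hA, ih, pvB_bs_fail]
    intro x y z r he
    injection he with e1 he; injection he with e2 he; injection he with e3 _
    subst e1; subst e2; subst e3
    simp only [Bool.and_eq_true, decide_eq_true_eq]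
    rintro ⟨⟨hx, hy⟩, hz⟩
    exact h2 (by simp [hx.2, hy.2, hz.2])
  | case4 c a b d rest h1 ih =>
    by_cases hc : c = '\\'
    · subst hc
      have hA : pvLoopA ('\\' :: a :: b :: d :: rest) = '\\' :: pvLoopA (a :: b :: d :: rest) := by
        simp only [pvLoopA]
        rw [if_neg (by simpa using h1)]
      rw [hA, ih, pvB_bs_fail]
      intro x y z r he
      injection he with e1 he; injection he with e2 he; injection he with e3 _
      subst e1; subst e2; subst e3
      simp only [Bool.and_eq_true, decide_eq_true_eq]
      rintro ⟨⟨hx, hy⟩, hz⟩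
      exact h1 (by simp [PySem.Chars.isdigit, hx.1, hy.1, hz.1,
        le_trans hx.2 (by decide : ('7' : Char) ≤ '9'),
        le_trans hy.2 (by decide : ('7' : Char) ≤ '9'),
        le_trans hz.2 (by decide : ('7' : Char) ≤ '9')])
    · have hA : pvLoopA (c :: a :: b :: d :: rest) = c :: pvLoopA (a :: b :: d :: rest) := by
        simp only [pvLoopA]
        rw [if_neg h1]
      rw [hA, ih, pvB_cons_ne c _ hc]
  | case5 c rest hshort ih =>
    have hA : pvLoopA (c :: rest) = c :: pvLoopA rest := by
      match rest, hshort with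
      | [], _ => rfl
      | [_], _ => rfl
      | [_, _], _ => rfl
      | a :: b :: d :: r, hs => exact absurd rfl (by intro h; exact hs a b d r h)
    rw [hA, ih]
    by_cases hc : c = '\\'
    · subst hc
      rw [pvB_bs_fail]
      intro x y z r he
      exact absurd he (by intro h; exact hshort x y z r h)
    · rw [pvB_cons_ne c _ hc]

theorem pv_no_bs (l : List Char) (h : '\\' ∉ l) : pvSplitBS l = [l] := by
  induction l with
  | nil => simp [pvSplitBS]
  | cons c rest ih =>
    simp at h
    simp [pvSplitBS, Ne.symm h.1, ih h.2]

theorem pv_alt_eq (s : String) : decode_escapes_py_alt s = String.ofList (pvB s.toList) := by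
  unfold decode_escapes_py_alt
  rw [pvSplitOn_eq]
  obtain ⟨p, ps, hps⟩ := pvSplitBS_exists s.toList
  rw [hps]
  simp [pvB, hps, pv_join_nil_eq_flatten]

-- ===== VERDICT (by name: the statement is the Claim_ definition above) =====
theorem decode_escapes_py_spec : Claim_equal_decode_escapes_py := by
  intro s _
  unfold Spec_decode_escapes_py decode_escapes_py
  rw [pv_alt_eq]
  by_cases hin : PySem.Str.isIn "\\" s = false
  · rw [if_pos hin]
    have hmem : '\\' ∉ s.toList := by
      intro hm
      have : PySem.Str.isIn "\\" s = true :=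
        (PySem.Str.isIn_iff_infix "\\" s).mpr (by
          rw [show ("\\" : String).toList = ['\\'] from rfl]
          exact (List.singleton_infix_iff '\\' s.toList).mpr hm)
      rw [this] at hin; exact absurd hin (by simp)
    rw [show pvB s.toList = s.toList from by simp [pvB, pv_no_bs s.toList hmem]]
    exact String.ofList_toList.symm
  · rw [if_neg hin, pv_main]
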